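-- pv_equiv track=rewrite | github.com/mbensan/proyectos_algoritmos_cd | desafios/index.py | calcular_distancia
-- ===== SOURCE A (Python) =====
-- def calcular_distancia(combinacion, dds):
--     #[3, 5]
--     distancias = 0
--     for dd in dds:
--         distancia_dd = 100000
--         for comp in combinacion:
--             distancia_dd_comp = abs(dd[0] - comp) + abs(dd[1] - comp)
--             if distancia_dd_comp < distancia_dd:
--                 distancia_dd = distancia_dd_comp
--         distancias += distancia_dd
--
--     return distancias
-- ===== SOURCE B (Python) =====
-- def calcular_distancia(combinacion, dds):
--     xs = sorted(combinacion)
--     n = len(xs)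
--     total = 0
--     for dd in dds:
--         if n == 0:
--             total += 100000
--             continue
--         a, b = dd[0], dd[1]
--         lo, hi = (a, b) if a <= b else (b, a)
--         # first index i with xs[i] >= lo (hand-rolled bisect_left)
--         i, j = 0, n
--         while i < j:
--             m = (i + j) // 2
--             if xs[m] < lo:
--                 i = m + 1
--             else:
--                 j = m
--         if i < n and xs[i] <= hi:
--             d = hi - lo
--         elif i == n:
--             d = hi - lo + 2 * (lo - xs[n - 1])
--         elif i == 0:
--             d = hi - lo + 2 * (xs[0] - hi)
--         else:
--             d = hi - lo + 2 * min(xs[i] - hi, lo - xs[i - 1])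
--         total += d if d < 100000 else 100000
--     return total
-- ===== Notes on version B (the rewrite author's own statement) =====
-- stated objective: faster
-- what changed: B sorts combinacion once and replaces A's per-dd linear scan by a binary search for the element nearest the interval [min(dd),max(dd)], keeping A's 100000 cap (A's loop never goes above its 100000 start).
import Mathlib
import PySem

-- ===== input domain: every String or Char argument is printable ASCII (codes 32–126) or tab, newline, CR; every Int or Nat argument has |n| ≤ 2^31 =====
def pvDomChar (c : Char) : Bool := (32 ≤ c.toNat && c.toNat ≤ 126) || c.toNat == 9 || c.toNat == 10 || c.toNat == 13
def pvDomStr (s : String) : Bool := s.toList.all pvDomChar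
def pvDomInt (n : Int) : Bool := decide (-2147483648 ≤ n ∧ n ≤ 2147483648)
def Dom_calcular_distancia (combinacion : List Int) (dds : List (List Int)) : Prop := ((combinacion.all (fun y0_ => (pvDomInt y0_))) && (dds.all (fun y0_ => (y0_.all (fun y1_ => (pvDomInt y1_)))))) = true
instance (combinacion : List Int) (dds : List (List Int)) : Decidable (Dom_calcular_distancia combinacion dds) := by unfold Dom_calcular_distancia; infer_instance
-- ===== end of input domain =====

-- B replaces A's inner scan over `combinacion` by sorting it once and, per dd, a hand-rolled
-- binary search for the point nearest the interval [min(dd0,dd1), max(dd0,dd1)] (objective: faster).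

-- ===== PORT A =====
def calcular_distancia (combinacion : List Int) (dds : List (List Int)) : Int :=
  dds.foldl (fun distancias dd =>
    let distancia_dd := combinacion.foldl (fun distancia_dd comp =>
      -- dd[0] / dd[1]: IndexError (pyGet? = none) on rows shorter than 2 is excluded by Pre_
      let dc := |(PySem.List.pyGet? dd 0).getD 0 - comp| + |(PySem.List.pyGet? dd 1).getD 0 - comp|
      if dc < distancia_dd then dc else distancia_dd) 100000
    distancias + distancia_dd) 0

-- ===== PORT B =====
-- Source B's hand-rolled bisect_left while-loop: first index in [i, j) whose element is ≥ lo
def pvBisect (xs : List Int) (lo : Int) (i j : Nat) : Nat :=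
  if _h : i < j then
    let m := (i + j) / 2
    if xs.getD m 0 < lo then pvBisect xs lo (m + 1) j else pvBisect xs lo i m
  else i
termination_by j - i
decreasing_by all_goals omega

def calcular_distancia_alt (combinacion : List Int) (dds : List (List Int)) : Int :=
  let xs := PySem.List.sorted combinacion (fun x => x) false
  let n := xs.length
  dds.foldl (fun total dd =>
    if n = 0 then total + 100000
    else
      -- dd[0] / dd[1]: rows shorter than 2 are excluded by Pre_ (Source B raises there too)
      let a := (PySem.List.pyGet? dd 0).getD 0
      let b := (PySem.List.pyGet? dd 1).getD 0
      let lo := if a ≤ b then a else b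
      let hi := if a ≤ b then b else a
      let i := pvBisect xs lo 0 n
      let d :=
        if i < n ∧ xs.getD i 0 ≤ hi then hi - lo
        else if i = n then hi - lo + 2 * (lo - xs.getD (n - 1) 0)
        else if i = 0 then hi - lo + 2 * (xs.getD 0 0 - hi)
        else hi - lo + 2 * min (xs.getD i 0 - hi) (lo - xs.getD (i - 1) 0)
      total + (if d < 100000 then d else 100000)) 0

-- ===== PRECONDITION & SPEC =====
-- Pre_ excludes exactly the inputs where the Python A raises IndexError: a nonempty
-- `combinacion` together with some dd row of length < 2 (with empty `combinacion` the
-- inner loop body never runs, so A returns even on short rows).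
def Pre_calcular_distancia (combinacion : List Int) (dds : List (List Int)) : Prop :=
  combinacion = [] ∨ ∀ dd ∈ dds, 2 ≤ dd.length
instance (combinacion : List Int) (dds : List (List Int)) : Decidable (Pre_calcular_distancia combinacion dds) := by unfold Pre_calcular_distancia; infer_instance
def pvWitness_calcular_distancia : List Int × List (List Int) := ([3, 5], [[1, 2], [7, 9]])

def Spec_calcular_distancia (combinacion : List Int) (dds : List (List Int)) (out : Int) : Prop := out = calcular_distancia_alt combinacion dds
instance (combinacion : List Int) (dds : List (List Int)) (out : Int) : Decidable (Spec_calcular_distancia combinacion dds out) := by unfold Spec_calcular_distancia; infer_instance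

-- ===== CLAIM (what is proved, stated in full; the proofs are below) =====
def Claim_equal_calcular_distancia : Prop := ∀ (combinacion : List Int) (dds : List (List Int)), Dom_calcular_distancia combinacion dds → Pre_calcular_distancia combinacion dds → Spec_calcular_distancia combinacion dds (calcular_distancia combinacion dds)

-- ===== LEMMAS AND PROOFS =====

-- sorted lists: getD is monotone in the index
theorem pv_sorted_getD_mono (xs : List Int) (hs : xs.Pairwise (· ≤ ·)) (k k' : Nat)
    (hkk : k ≤ k') (hk' : k' < xs.length) : xs.getD k 0 ≤ xs.getD k' 0 := by
  rcases Nat.eq_or_lt_of_le hkk with rfl | hlt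
  · exact le_refl _
  · rw [List.getD_eq_getElem xs 0 (Nat.lt_of_lt_of_le hlt (Nat.le_of_lt hk')),
        List.getD_eq_getElem xs 0 hk']
    exact List.pairwise_iff_getElem.mp hs k k' _ _ hlt

-- correctness of the hand-rolled bisect_left
theorem pvBisect_spec (xs : List Int) (lo : Int) (hs : xs.Pairwise (· ≤ ·)) :
    ∀ fuel i j, j - i ≤ fuel → i ≤ j → j ≤ xs.length →
    (∀ k, k < i → xs.getD k 0 < lo) →
    (∀ k, j ≤ k → k < xs.length → lo ≤ xs.getD k 0) →
    pvBisect xs lo i j ≤ j ∧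
    (∀ k, k < pvBisect xs lo i j → xs.getD k 0 < lo) ∧
    (∀ k, pvBisect xs lo i j ≤ k → k < xs.length → lo ≤ xs.getD k 0) := by
  intro fuel
  induction fuel with
  | zero =>
    intro i j hf hij hjn hlow hup
    have hij' : i = j := by omega
    subst hij'
    rw [pvBisect, dif_neg (by omega)]
    exact ⟨le_refl _, hlow, hup⟩
  | succ f ih =>
    intro i j hf hij hjn hlow hup
    rw [pvBisect]
    by_cases h : i < j
    · simp only [h, dite_true]
      by_cases hm : xs.getD ((i + j) / 2) 0 < lo
      · simp only [hm, if_true]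
        exact ih ((i + j) / 2 + 1) j (by omega) (by omega) hjn
          (fun k hk => lt_of_le_of_lt
            (pv_sorted_getD_mono xs hs k ((i + j) / 2) (by omega) (by omega)) hm) hup
      · simp only [hm, if_false]
        obtain ⟨h1, h2, h3⟩ := ih i ((i + j) / 2) (by omega) (by omega) (by omega) hlow
          (fun k hk hkn => le_trans (not_lt.mp hm)
            (pv_sorted_getD_mono xs hs ((i + j) / 2) k hk hkn))
        exact ⟨by omega, h2, h3⟩
    · rw [dif_neg h]
      have : i = j := by omega
      subst this
      exact ⟨le_refl _, hlow, hup⟩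

-- getD of an in-range index is a member
theorem pv_getD_mem (xs : List Int) (k : Nat) (hk : k < xs.length) : xs.getD k 0 ∈ xs := by
  rw [List.getD_eq_getElem xs 0 hk]; exact List.getElem_mem hk

-- a fold of running minima stays at `a` when `a` is a lower bound
theorem pv_foldl_min_ge (X Y : Int) :
    ∀ (l : List Int) (a : Int), (∀ x ∈ l, a ≤ |X - x| + |Y - x|) →
    l.foldl (fun acc c => if |X - c| + |Y - c| < acc then |X - c| + |Y - c| else acc) a = a := by
  intro l
  induction l with
  | nil => intro a _; rfl
  | cons x t ih =>
    intro a h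
    simp only [List.foldl_cons]
    have hx : a ≤ |X - x| + |Y - x| := h x (List.mem_cons_self)
    rw [if_neg (by omega)]
    exact ih a fun y hy => h y (List.mem_cons_of_mem _ hy)

-- A's inner loop computes min init d when d is the attained minimum over l
theorem pv_foldl_min_char (X Y : Int) :
    ∀ (l : List Int) (init d : Int),
    (∃ c ∈ l, |X - c| + |Y - c| = d) → (∀ c ∈ l, d ≤ |X - c| + |Y - c|) →
    l.foldl (fun acc c => if |X - c| + |Y - c| < acc then |X - c| + |Y - c| else acc) init = min init d := by
  intro l
  induction l with
  | nil => intro init d h _; rcases h with ⟨c, hc, _⟩; cases hc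
  | cons x t ih =>
    intro init d hex hall
    have hdx : d ≤ |X - x| + |Y - x| := hall x (List.mem_cons_self)
    have hallt : ∀ c ∈ t, d ≤ |X - c| + |Y - c| := fun c hc => hall c (List.mem_cons_of_mem _ hc)
    simp only [List.foldl_cons]
    rcases hex with ⟨c, hc, hcd⟩
    rcases List.mem_cons.mp hc with rfl | hct
    · -- the witness is the head: after the head step the accumulator is min init d
      have hstep : (if |X - c| + |Y - c| < init then |X - c| + |Y - c| else init) = min init d := by
        omega
      rw [hstep]
      exact pv_foldl_min_ge X Y t (min init d) fun y hy => le_trans (by omega) (hallt y hy)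
    · -- the witness is in the tail
      rw [ih _ d ⟨c, hct, hcd⟩ hallt]
      omega

-- |lo - c| + |hi - c| for lo ≤ hi, in the three regions, and its global lower bound
theorem pv_g_inside (lo hi c : Int) (h1 : lo ≤ c) (h2 : c ≤ hi) :
    |lo - c| + |hi - c| = hi - lo := by
  rcases abs_cases (lo - c) with ⟨e1, _⟩ | ⟨e1, _⟩ <;>
  rcases abs_cases (hi - c) with ⟨e2, _⟩ | ⟨e2, _⟩ <;> omega
theorem pv_g_left (lo hi c : Int) (_hlh : lo ≤ hi) (h : c < lo) :
    |lo - c| + |hi - c| = hi - lo + 2 * (lo - c) := by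
  rcases abs_cases (lo - c) with ⟨e1, _⟩ | ⟨e1, _⟩ <;>
  rcases abs_cases (hi - c) with ⟨e2, _⟩ | ⟨e2, _⟩ <;> omega
theorem pv_g_right (lo hi c : Int) (_hlh : lo ≤ hi) (h : hi < c) :
    |lo - c| + |hi - c| = hi - lo + 2 * (c - hi) := by
  rcases abs_cases (lo - c) with ⟨e1, _⟩ | ⟨e1, _⟩ <;>
  rcases abs_cases (hi - c) with ⟨e2, _⟩ | ⟨e2, _⟩ <;> omega
theorem pv_g_lb (lo hi c : Int) (hlh : lo ≤ hi) : hi - lo ≤ |lo - c| + |hi - c| := by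
  rcases abs_cases (lo - c) with ⟨e1, _⟩ | ⟨e1, _⟩ <;>
  rcases abs_cases (hi - c) with ⟨e2, _⟩ | ⟨e2, _⟩ <;> omega

-- the binary-search value d is the attained minimum of c ↦ |lo-c| + |hi-c| over the sorted xs
theorem pv_perDD (xs : List Int) (hs : xs.Pairwise (· ≤ ·)) (hne : 0 < xs.length)
    (lo hi : Int) (hlh : lo ≤ hi) :
    (∃ c ∈ xs, |lo - c| + |hi - c| =
      (if pvBisect xs lo 0 xs.length < xs.length ∧ xs.getD (pvBisect xs lo 0 xs.length) 0 ≤ hi then hi - lo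
       else if pvBisect xs lo 0 xs.length = xs.length then hi - lo + 2 * (lo - xs.getD (xs.length - 1) 0)
       else if pvBisect xs lo 0 xs.length = 0 then hi - lo + 2 * (xs.getD 0 0 - hi)
       else hi - lo + 2 * min (xs.getD (pvBisect xs lo 0 xs.length) 0 - hi) (lo - xs.getD (pvBisect xs lo 0 xs.length - 1) 0))) ∧
    (∀ c ∈ xs, (if pvBisect xs lo 0 xs.length < xs.length ∧ xs.getD (pvBisect xs lo 0 xs.length) 0 ≤ hi then hi - lo
       else if pvBisect xs lo 0 xs.length = xs.length then hi - lo + 2 * (lo - xs.getD (xs.length - 1) 0)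
       else if pvBisect xs lo 0 xs.length = 0 then hi - lo + 2 * (xs.getD 0 0 - hi)
       else hi - lo + 2 * min (xs.getD (pvBisect xs lo 0 xs.length) 0 - hi) (lo - xs.getD (pvBisect xs lo 0 xs.length - 1) 0)) ≤ |lo - c| + |hi - c|) := by
  obtain ⟨hle, hlow, hup⟩ := pvBisect_spec xs lo hs xs.length 0 xs.length (by omega) (by omega)
      (le_refl _) (by omega) (by intro k hk hk'; omega)
  generalize hgen : pvBisect xs lo 0 xs.length = i at hle hlow hup ⊢
  have hmemIdx : ∀ c ∈ xs, ∃ k, ∃ h : k < xs.length, xs.getD k 0 = c := by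
    intro c hc
    obtain ⟨k, hk, he⟩ := List.mem_iff_getElem.mp hc
    exact ⟨k, hk, by rw [List.getD_eq_getElem xs 0 hk]; exact he⟩
  by_cases h1 : i < xs.length ∧ xs.getD i 0 ≤ hi
  · rw [if_pos h1]
    have hgei : lo ≤ xs.getD i 0 := hup i (le_refl _) h1.1
    exact ⟨⟨xs.getD i 0, pv_getD_mem xs i h1.1, pv_g_inside lo hi _ hgei h1.2⟩,
      fun c _ => pv_g_lb lo hi c hlh⟩
  · rw [if_neg h1]
    by_cases h2 : i = xs.length
    · rw [if_pos h2]
      have hlast : xs.getD (xs.length - 1) 0 < lo := hlow _ (by omega)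
      refine ⟨⟨xs.getD (xs.length - 1) 0, pv_getD_mem xs _ (by omega),
          pv_g_left lo hi _ hlh hlast⟩, ?_⟩
      intro c hc
      obtain ⟨k, hk, rfl⟩ := hmemIdx c hc
      have hck : xs.getD k 0 ≤ xs.getD (xs.length - 1) 0 :=
        pv_sorted_getD_mono xs hs k (xs.length - 1) (by omega) (by omega)
      have hcl : xs.getD k 0 < lo := hlow k (by omega)
      rw [pv_g_left lo hi _ hlh hcl]; omega
    · have hii : i < xs.length := by omega
      have hhi : hi < xs.getD i 0 := by
        by_contra hcon; exact h1 ⟨hii, not_lt.mp hcon⟩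
      by_cases h3 : i = 0
      · rw [if_neg h2, if_pos h3]
        subst h3
        refine ⟨⟨xs.getD 0 0, pv_getD_mem xs 0 hne,
          by rw [pv_g_right lo hi _ hlh hhi]⟩, ?_⟩
        intro c hc
        obtain ⟨k, hk, rfl⟩ := hmemIdx c hc
        have h0k : xs.getD 0 0 ≤ xs.getD k 0 := pv_sorted_getD_mono xs hs 0 k (by omega) hk
        rw [pv_g_right lo hi _ hlh (by omega)]; omega
      · rw [if_neg h2, if_neg h3]
        have hprev : xs.getD (i - 1) 0 < lo := hlow (i - 1) (by omega)
        constructor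
        · rcases le_total (xs.getD i 0 - hi) (lo - xs.getD (i - 1) 0) with hmin | hmin
          · exact ⟨xs.getD i 0, pv_getD_mem xs i hii,
              by rw [pv_g_right lo hi _ hlh hhi]; omega⟩
          · exact ⟨xs.getD (i - 1) 0, pv_getD_mem xs _ (by omega),
              by rw [pv_g_left lo hi _ hlh hprev]; omega⟩
        · intro c hc
          obtain ⟨k, hk, rfl⟩ := hmemIdx c hc
          by_cases hki : k < i
          · have : xs.getD k 0 ≤ xs.getD (i - 1) 0 :=
              pv_sorted_getD_mono xs hs k (i - 1) (by omega) (by omega)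
            have hcl : xs.getD k 0 < lo := hlow k hki
            rw [pv_g_left lo hi _ hlh hcl]; omega
          · have : xs.getD i 0 ≤ xs.getD k 0 :=
              pv_sorted_getD_mono xs hs i k (by omega) hk
            rw [pv_g_right lo hi _ hlh (by omega)]; omega

-- ===== VERDICT (by name: the statement is the Claim_ definition above) =====
theorem calcular_distancia_spec : Claim_equal_calcular_distancia := by
  intro combinacion dds _ _
  unfold Spec_calcular_distancia calcular_distancia calcular_distancia_alt
  simp only
  refine List.foldl_ext _ _ 0 ?_
  intro acc dd _
  by_cases hcomb : combinacion = []
  · subst hcomb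
    have hx0 : PySem.List.sorted ([] : List Int) (fun x => x) false = [] := rfl
    simp [hx0]
  · have hlen : (PySem.List.sorted combinacion (fun x => x) false).length = combinacion.length :=
      (PySem.List.sorted_perm combinacion (fun x => x) false).length_eq
    have hn : ¬ (PySem.List.sorted combinacion (fun x => x) false).length = 0 := by
      intro h0
      exact hcomb (List.eq_nil_of_length_eq_zero (by omega))
    rw [if_neg hn]
    have hs := PySem.List.sorted_pairwise combinacion (fun x => x)
    have hgeq : ∀ c : Int,
        |(PySem.List.pyGet? dd 0).getD 0 - c| + |(PySem.List.pyGet? dd 1).getD 0 - c| =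
        |(if (PySem.List.pyGet? dd 0).getD 0 ≤ (PySem.List.pyGet? dd 1).getD 0 then (PySem.List.pyGet? dd 0).getD 0 else (PySem.List.pyGet? dd 1).getD 0) - c| +
        |(if (PySem.List.pyGet? dd 0).getD 0 ≤ (PySem.List.pyGet? dd 1).getD 0 then (PySem.List.pyGet? dd 1).getD 0 else (PySem.List.pyGet? dd 0).getD 0) - c| := by
      intro c; split_ifs with h
      · rfl
      · exact add_comm _ _
    have hlh : (if (PySem.List.pyGet? dd 0).getD 0 ≤ (PySem.List.pyGet? dd 1).getD 0 then (PySem.List.pyGet? dd 0).getD 0 else (PySem.List.pyGet? dd 1).getD 0) ≤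
        (if (PySem.List.pyGet? dd 0).getD 0 ≤ (PySem.List.pyGet? dd 1).getD 0 then (PySem.List.pyGet? dd 1).getD 0 else (PySem.List.pyGet? dd 0).getD 0) := by
      split_ifs with h <;> omega
    obtain ⟨⟨c0, hc0, hcd⟩, hall⟩ := pv_perDD (PySem.List.sorted combinacion (fun x => x) false)
      hs (by omega) _ _ hlh
    have hmem : ∀ x : Int, x ∈ PySem.List.sorted combinacion (fun x => x) false ↔ x ∈ combinacion :=
      fun x => PySem.List.mem_sorted combinacion (fun x => x) false x
    rw [← hgeq c0] at hcd
    have hfold := pv_foldl_min_char ((PySem.List.pyGet? dd 0).getD 0) ((PySem.List.pyGet? dd 1).getD 0)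
      combinacion 100000 _ ⟨c0, (hmem c0).mp hc0, hcd⟩
      (fun c hc => le_trans (hall c ((hmem c).mpr hc)) (le_of_eq (hgeq c).symm))
    rw [hfold]
    omega
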